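-- pv_equiv track=rewrite | github.com/kje016/INF247 | Stream Ciphers/2103Annihilator.py | annihilators_truth_table
-- ===== SOURCE A (Python) =====
-- import copy
--
-- def annihilators_truth_table(truth_col):
--     annihilators = [[0]]
--     if truth_col[0] == 0:
--         annihilators.append([1])
--
--     for i in range(1, len(truth_col)):
--         copies = copy.deepcopy(annihilators)
--         annihilators = [ani+[0] for ani in annihilators]
--         if truth_col[i] == 0:
--             ones = [annihi+[1] for annihi in copies]
--             annihilators.extend(ones)
--     return annihilators
-- ===== SOURCE B (Python) =====
-- def annihilators_truth_table(truth_col):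
--     z = truth_col.count(0)
--     out = []
--     for k in range(2 ** z):
--         mask = []
--         for c in truth_col:
--             if c == 0:
--                 mask.append(k % 2)
--                 k //= 2
--             else:
--                 mask.append(0)
--         out.append(mask)
--     return out
-- ===== Notes on version B (the rewrite author's own statement) =====
-- stated objective: alternative
-- what changed: Replaces A's incremental list doubling with per-step deepcopy by direct bit-counter enumeration: for each k in range(2**count_of_zeros) one scan of the column consumes k's binary digits at the zero positions (k%2, k//=2) and writes 0 elsewhere.
import Mathlib
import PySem

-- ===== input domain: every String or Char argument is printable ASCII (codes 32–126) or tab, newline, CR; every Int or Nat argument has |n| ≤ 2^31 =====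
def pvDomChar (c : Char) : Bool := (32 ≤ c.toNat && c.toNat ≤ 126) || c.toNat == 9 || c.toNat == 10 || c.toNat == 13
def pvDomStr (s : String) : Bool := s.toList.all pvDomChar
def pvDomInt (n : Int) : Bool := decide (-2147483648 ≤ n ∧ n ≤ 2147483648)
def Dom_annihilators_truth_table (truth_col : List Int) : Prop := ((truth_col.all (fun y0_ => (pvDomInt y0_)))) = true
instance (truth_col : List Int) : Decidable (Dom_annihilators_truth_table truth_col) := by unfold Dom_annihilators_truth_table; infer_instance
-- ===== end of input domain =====

-- B replaces A's incremental doubling (with per-step deepcopy) by bit-counter enumeration: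
-- the k-th mask is one scan of the column consuming k's binary digits at the zero positions.

-- ===== PORT A =====
-- one loop step: annihilators = [ani+[0] …]; if col==0 also extend with [ani+[1] …]
def annStep (ann : List (List Int)) (c : Int) : List (List Int) :=
  let zeros := ann.map (fun a => a ++ [0])
  if c = 0 then zeros ++ ann.map (fun a => a ++ [1]) else zeros

def annihilators_truth_table (truth_col : List Int) : List (List Int) :=
  match truth_col with
  | [] => []  -- Python raises IndexError on truth_col[0]; excluded by Pre_
  | c0 :: rest =>
    let init := if c0 = 0 then [[0], [1]] else [[(0 : Int)]]
    rest.foldl annStep init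

-- ===== PORT B =====
-- inner loop of B: scan the column, consuming binary digits of k at the zero positions
-- (k % 2 and k //= 2 on the nonnegative k from range; exact as Nat % and /)
def maskStep (st : List Int × Nat) (c : Int) : List Int × Nat :=
  if c = 0 then (st.1 ++ [((st.2 % 2 : Nat) : Int)], st.2 / 2)
  else (st.1 ++ [0], st.2)

def maskOf (truth_col : List Int) (k : Nat) : List Int :=
  (truth_col.foldl maskStep ([], k)).1

def annihilators_truth_table_alt (truth_col : List Int) : List (List Int) :=
  (List.range (2 ^ truth_col.count 0)).map (maskOf truth_col)

-- ===== PRECONDITION & SPEC =====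
-- Pre_ excludes only the empty list, on which A raises IndexError (truth_col[0]).
def Pre_annihilators_truth_table (truth_col : List Int) : Prop := truth_col ≠ []
instance (truth_col : List Int) : Decidable (Pre_annihilators_truth_table truth_col) := by
  unfold Pre_annihilators_truth_table; infer_instance
def pvWitness_annihilators_truth_table : List Int := [0, 1, 0]

def Spec_annihilators_truth_table (truth_col : List Int) (out : List (List Int)) : Prop :=
  out = annihilators_truth_table_alt truth_col
instance (truth_col : List Int) (out : List (List Int)) :
    Decidable (Spec_annihilators_truth_table truth_col out) := by
  unfold Spec_annihilators_truth_table; infer_instance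

-- ===== CLAIM (what is proved, stated in full; the proofs are below) =====
def Claim_equal_annihilators_truth_table : Prop := ∀ (truth_col : List Int), Dom_annihilators_truth_table truth_col → Pre_annihilators_truth_table truth_col → Spec_annihilators_truth_table truth_col (annihilators_truth_table truth_col)

-- ===== LEMMAS AND PROOFS =====

-- B's value on an arbitrary processed prefix L (F [] = [[]])
def F (L : List Int) : List (List Int) :=
  (List.range (2 ^ L.count 0)).map (maskOf L)

-- the accumulator of B's inner scan factors out
theorem foldl_maskStep_acc (L : List Int) (acc : List Int) (k : Nat) :
    L.foldl maskStep (acc, k) =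
      (acc ++ (L.foldl maskStep ([], k)).1, (L.foldl maskStep ([], k)).2) := by
  induction L generalizing acc k with
  | nil => simp
  | cons c L ih =>
    simp only [List.foldl_cons, maskStep]
    by_cases hc : c = 0
    · simp only [if_pos hc, List.nil_append]
      rw [ih, ih [((k % 2 : Nat) : Int)]]
      simp
    · simp only [if_neg hc, List.nil_append]
      rw [ih, ih [(0 : Int)]]
      simp

-- how B's inner scan threads the counter: the mask uses k mod 2^z, the leftover is k / 2^z
theorem foldl_maskStep_pair (L : List Int) (k : Nat) :
    L.foldl maskStep ([], k) =
      (maskOf L (k % 2 ^ L.count 0), k / 2 ^ L.count 0) := by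
  induction L generalizing k with
  | nil => simp [maskOf]
  | cons c L ih =>
    by_cases hc : c = 0
    · subst hc
      have hcnt : ((0 : Int) :: L).count 0 = L.count 0 + 1 := by simp
      have h1 : k % 2 ^ (L.count 0 + 1) % 2 = k % 2 :=
        Nat.mod_mod_of_dvd k (dvd_pow_self 2 (Nat.succ_ne_zero _))
      have h2 : k % 2 ^ (L.count 0 + 1) / 2 = k / 2 % 2 ^ L.count 0 := by
        rw [pow_succ', Nat.mod_mul_right_div_self]
      have h3 : k / 2 ^ (L.count 0 + 1) = k / 2 / 2 ^ L.count 0 := by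
        rw [pow_succ', Nat.div_div_eq_div_mul]
      have hm : maskOf ((0 : Int) :: L) (k % 2 ^ (L.count 0 + 1)) =
          ((k % 2 : Nat) : Int) :: maskOf L (k / 2 % 2 ^ L.count 0) := by
        unfold maskOf
        simp only [List.foldl_cons, maskStep, List.nil_append, h1, h2]
        rw [foldl_maskStep_acc, ih]
        simp [maskOf]
      rw [hcnt, hm]
      simp only [List.foldl_cons, maskStep, List.nil_append]
      rw [foldl_maskStep_acc, ih, h3]
      simp [maskOf]
    · have hcnt : (c :: L).count 0 = L.count 0 := by
        simp [hc]
      have hm : maskOf (c :: L) (k % 2 ^ L.count 0) =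
          (0 : Int) :: maskOf L (k % 2 ^ L.count 0) := by
        unfold maskOf
        simp only [List.foldl_cons, maskStep, if_neg hc, List.nil_append]
        rw [foldl_maskStep_acc, ih, Nat.mod_mod_of_dvd _ dvd_rfl]
        simp [maskOf]
      rw [hcnt, hm]
      simp only [List.foldl_cons, maskStep, if_neg hc, List.nil_append]
      rw [foldl_maskStep_acc, ih]
      simp [maskOf]

theorem maskOf_append_one (L : List Int) (c : Int) (k : Nat) :
    maskOf (L ++ [c]) k =
      (if c = 0 then
        maskOf L (k % 2 ^ L.count 0) ++ [((k / 2 ^ L.count 0 % 2 : Nat) : Int)]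
       else maskOf L (k % 2 ^ L.count 0) ++ [0]) := by
  unfold maskOf
  rw [List.foldl_append, foldl_maskStep_pair]
  by_cases hc : c = 0 <;> simp [maskStep, maskOf, hc]

-- one step of A applied to F L gives F (L ++ [c])
theorem F_snoc (L : List Int) (c : Int) : F (L ++ [c]) = annStep (F L) c := by
  by_cases hc : c = 0
  · have hcnt : (L ++ [c]).count 0 = L.count 0 + 1 := by
      simp [hc, List.count_append]
    unfold F annStep
    rw [if_pos hc, hcnt]
    rw [Nat.pow_succ, Nat.mul_two, List.range_add, List.map_append]
    simp only [List.map_map]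
    congr 1
    · apply List.map_congr_left
      intro k hk
      have hk' : k < 2 ^ L.count 0 := List.mem_range.mp hk
      simp [Function.comp, maskOf_append_one, hc, Nat.mod_eq_of_lt hk',
        Nat.div_eq_of_lt hk']
    · apply List.map_congr_left
      intro k hk
      have hk' : k < 2 ^ L.count 0 := List.mem_range.mp hk
      have hmod : (2 ^ L.count 0 + k) % 2 ^ L.count 0 = k := by
        rw [Nat.add_mod_left, Nat.mod_eq_of_lt hk']
      have hdiv : (2 ^ L.count 0 + k) / 2 ^ L.count 0 = 1 := by
        rw [Nat.add_div_left _ (Nat.two_pow_pos _),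
          Nat.div_eq_of_lt hk']
      simp [Function.comp, maskOf_append_one, hc, hmod, hdiv]
  · have hcnt : (L ++ [c]).count 0 = L.count 0 := by
      simp [List.count_append, hc]
    unfold F annStep
    rw [if_neg hc, hcnt]
    simp only [List.map_map]
    apply List.map_congr_left
    intro k hk
    have hk' : k < 2 ^ L.count 0 := List.mem_range.mp hk
    simp [Function.comp, maskOf_append_one, hc, Nat.mod_eq_of_lt hk']

theorem foldl_annStep_F (cs : List Int) (L : List Int) :
    cs.foldl annStep (F L) = F (L ++ cs) := by
  induction cs generalizing L with
  | nil => simp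
  | cons c cs ih =>
    simp only [List.foldl_cons]
    rw [← F_snoc, ih]
    simp

-- ===== VERDICT (by name: the statement is the Claim_ definition above) =====
theorem annihilators_truth_table_spec : Claim_equal_annihilators_truth_table := by
  intro truth_col _ hpre
  unfold Spec_annihilators_truth_table
  match truth_col with
  | [] => exact absurd rfl hpre
  | c0 :: rest =>
    show (rest.foldl annStep (if c0 = 0 then [[0],[1]] else [[(0:Int)]])) = _
    have hinit : (if c0 = 0 then [[(0:Int)],[1]] else [[(0:Int)]]) = F [c0] := by
      by_cases h : c0 = 0 <;>
        simp [h, F, maskOf, maskStep, List.range_succ]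
    rw [hinit, foldl_annStep_F]
    rfl
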